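-- pv_equiv track=rewrite | github.com/houhou1996/3I024 | cryptanalyse_vigenere.py | clef_par_decalages
-- ===== SOURCE A (Python) =====
-- alphabet = "ABCDEFGHIJKLMNOPQRSTUVWXYZ"
--
-- def freq(txt):
-- 	hist = []
-- 	for i in alphabet:
-- 		hist.append(txt.count(i))
-- 	return hist
--
-- def lettre_freq_max(txt):
--     return freq(txt).index(max(freq(txt)))
--
-- def clef_par_decalages(cipher, key_length):
--     decalages=[]
--     j=0
--     while(j<key_length):
--         s=""
--         for i in cipher[j::key_length]:
--             s+=i
--         decalages.append((alphabet.index(alphabet[lettre_freq_max(s)])-alphabet.index('E'))%26)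
--         j+=1
--     return decalages
-- ===== SOURCE B (Python) =====
-- alphabet = "ABCDEFGHIJKLMNOPQRSTUVWXYZ"
--
-- def clef_par_decalages(cipher, key_length):
--     if key_length <= 0:
--         return []
--     counts = [[0] * 26 for _ in range(key_length)]
--     for i, ch in enumerate(cipher):
--         k = ord(ch) - 65
--         if 0 <= k < 26:
--             counts[i % key_length][k] += 1
--     shifts = []
--     for row in counts:
--         best, best_val = 0, row[0]
--         for k, v in enumerate(row):
--             if v > best_val:
--                 best, best_val = k, v
--         shifts.append((best - 4) % 26)
--     return shifts
-- ===== Notes on version B (the rewrite author's own statement) =====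
-- stated objective: faster
-- what changed: Replaces per-column re-slicing of the cipher plus 26 full count() passes per column by one distributing pass over the cipher that fills a key_length x 26 counts table, followed by a first-argmax scan of each 26-entry row (strict > keeps the earliest letter, matching list.index(max(...))).
import Mathlib
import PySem

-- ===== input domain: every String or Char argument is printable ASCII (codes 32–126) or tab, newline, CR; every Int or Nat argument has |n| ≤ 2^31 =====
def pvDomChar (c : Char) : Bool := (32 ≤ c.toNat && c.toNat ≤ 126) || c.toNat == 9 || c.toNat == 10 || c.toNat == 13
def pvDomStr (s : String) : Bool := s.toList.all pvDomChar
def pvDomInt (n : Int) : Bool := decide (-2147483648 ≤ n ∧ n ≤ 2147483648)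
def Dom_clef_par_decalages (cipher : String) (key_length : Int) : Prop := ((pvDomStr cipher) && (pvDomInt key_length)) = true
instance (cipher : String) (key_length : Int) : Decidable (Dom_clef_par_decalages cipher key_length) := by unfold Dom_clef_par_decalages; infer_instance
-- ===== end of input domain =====

-- B replaces A's per-column re-slicing and 26 count() passes per column by one distributing
-- pass filling a key_length × 26 counts table plus a first-argmax scan of each row (faster).

-- ===== PORT A =====
-- alphabet = "ABCDEFGHIJKLMNOPQRSTUVWXYZ" (as a list of its code points; Python indexes/counts it char by char)
def pvAlph : List Char :=
  ['A','B','C','D','E','F','G','H','I','J','K','L','M',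
   'N','O','P','Q','R','S','T','U','V','W','X','Y','Z']

-- def freq(txt): hist = []; for i in alphabet: hist.append(txt.count(i)); return hist
-- (txt.count(c) on a string with a single-char needle is exactly the char count)
def pvFreq (txt : List Char) : List Int :=
  pvAlph.foldl (fun hist i => hist ++ [(txt.count i : Int)]) []

-- def lettre_freq_max(txt): return freq(txt).index(max(freq(txt)))
-- max() of a nonempty list never raises here (freq always has 26 entries) and its value is
-- always a member, so .index never raises: the total .getD forms are exact.
def pvLettreFreqMax (txt : List Char) : Int :=
  ((PySem.List.index? (pvFreq txt)
      ((PySem.List.max? (pvFreq txt) (fun x => x)).getD 0)).getD 0 : Int)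

-- while(j<key_length) with j = 0,1,… is the loop over range(0, key_length)
def clef_par_decalages (cipher : String) (key_length : Int) : List Int :=
  (PySem.List.pyRange 0 key_length 1).foldl (fun decalages j =>
    -- s=""; for i in cipher[j::key_length]: s+=i   (char-by-char copy of the slice)
    let col := (PySem.List.slice? cipher.toList (some j) none key_length).getD []
    let s := col.foldl (fun acc i => acc ++ [i]) []
    -- alphabet[lettre_freq_max(s)] is always in range (0..25), and every alphabet letter
    -- is found by alphabet.index, so the total .getD forms are exact
    decalages ++ [PySem.Int.mod
      (((PySem.List.index? pvAlph ((PySem.List.pyGet? pvAlph (pvLettreFreqMax s)).getD 'A')).getD 0 : Int)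
        - ((PySem.List.index? pvAlph 'E').getD 0 : Int)) 26]) []

-- ===== PORT B =====
-- loop body of B's distributing pass: counts[i % key_length][ord(ch)-65] += 1 for uppercase ch
-- (i ≥ 0 and 0 < key_length whenever this runs, so the indices are in range: pyGetD/pySetD exact)
def pvAltStep (n : Int) (counts : List (List Int)) (p : Int × Char) : List (List Int) :=
  let k : Int := (p.2.toNat : Int) - 65
  if 0 ≤ k ∧ k < 26 then
    let r := PySem.Int.mod p.1 n
    let row := PySem.List.pyGetD counts r []
    PySem.List.pySetD counts r (PySem.List.pySetD row k (PySem.List.pyGetD row k 0 + 1))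
  else counts

-- best, best_val = 0, row[0]; for k, v in enumerate(row): if v > best_val: best, best_val = k, v
def pvAltArgmax (row : List Int) : Int :=
  ((PySem.List.enumerate row 0).foldl
    (fun bb p => if p.2 > bb.2 then p else bb) ((0:Int), PySem.List.pyGetD row 0 0)).1

def clef_par_decalages_alt (cipher : String) (key_length : Int) : List Int :=
  if key_length ≤ 0 then []
  else
    let counts0 : List (List Int) := List.replicate key_length.toNat (List.replicate 26 0)
    let counts := (PySem.List.enumerate cipher.toList 0).foldl (pvAltStep key_length) counts0
    counts.foldl (fun shifts row => shifts ++ [PySem.Int.mod (pvAltArgmax row - 4) 26]) []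

-- ===== PRECONDITION & SPEC =====
def Spec_clef_par_decalages (cipher : String) (key_length : Int) (out : List Int) : Prop := out = clef_par_decalages_alt cipher key_length
instance (cipher : String) (key_length : Int) (out : List Int) : Decidable (Spec_clef_par_decalages cipher key_length out) := by unfold Spec_clef_par_decalages; infer_instance

-- ===== CLAIM (what is proved, stated in full; the proofs are below) =====
def Claim_equal_clef_par_decalages : Prop := ∀ (cipher : String) (key_length : Int), Dom_clef_par_decalages cipher key_length → Spec_clef_par_decalages cipher key_length (clef_par_decalages cipher key_length)

-- ===== LEMMAS AND PROOFS =====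

def pvEveryNth {α : Type} : List α → Nat → List α
  | [], _ => []
  | x :: rest, n => x :: pvEveryNth (rest.drop n) n
  termination_by l _ => l.length
  decreasing_by simp only [List.length_drop, List.length_cons]; omega

def pvColCount (nn : Nat) : List Char → Nat → Char → Nat
  | [], _, _ => 0
  | c :: t, r, ch => (if r = 0 ∧ c = ch then 1 else 0) + pvColCount nn t (if r = 0 then nn - 1 else r - 1) ch

def pvFam : List Int → Int → Int → Int → Int × Int
  | [], _, b, v => (b, v)
  | y :: t, i, b, v => if y > v then pvFam t (i+1) i y else pvFam t (i+1) b v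

theorem pv_alph_getD : ∀ k, k < 26 → pvAlph.getD k 'A' = Char.ofNat (65 + k) := by decide

theorem pv_char_eq (ch : Char) (k : Nat) (hk : k < 26) :
    (ch = pvAlph.getD k 'A') ↔ ch.toNat = 65 + k := by
  rw [pv_alph_getD k hk]
  constructor
  · intro h; rw [h]
    have : ∀ k, k < 26 → (Char.ofNat (65 + k)).toNat = 65 + k := by decide
    exact this k hk
  · intro h; rw [← Char.ofNat_toNat ch, h]

theorem pv_rowId (row : List Int) (h : row.length = 26) :
    (List.range 26).map (fun k => row.getD k 0) = row := by
  apply List.ext_getElem (by simp [h])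
  intro i h1 h2
  simp only [List.getElem_map, List.getElem_range]
  rw [List.getD_eq_getElem row 0 (by omega)]

theorem pv_head_pred (nn s j k : Nat) (ch : Char) (hk : k < 26) :
    ((PySem.Int.mod ((s:Nat):Int) (nn:Int) == ((j:Nat):Int)) && (ch == pvAlph.getD k 'A'))
    = decide (j = s % nn ∧ ch.toNat = 65 + k) := by
  rw [PySem.Int.mod_natCast]
  apply Bool.eq_iff_iff.mpr
  simp only [Bool.and_eq_true, beq_iff_eq, decide_eq_true_eq, Nat.cast_inj]
  rw [pv_char_eq ch k hk]
  constructor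
  · rintro ⟨a, b⟩; exact ⟨a.symm, b⟩
  · rintro ⟨a, b⟩; exact ⟨a.symm, b⟩

theorem pv_cell (counts : List (List Int)) (row : List Int) (j0 k0 : Nat)
    (hj0 : j0 < counts.length) (hrow : counts[j0]'hj0 = row) (hrl : row.length = 26)
    (hk0 : k0 < 26) (j k : Nat) (hj : j < counts.length) (hk : k < 26) :
    ∀ (hj' : j < (counts.set j0 (row.set k0 (row[k0]'(by omega) + 1))).length),
    ((counts.set j0 (row.set k0 (row[k0]'(by omega) + 1)))[j]'hj').getD k 0
    = (counts[j]'hj).getD k 0 + (if j = j0 ∧ k = k0 then 1 else 0) := by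
  intro hj'
  by_cases hjj : j = j0
  · subst hjj
    rw [List.getElem_set_self (by omega)]
    have hcj : counts[j]'hj = row := hrow
    by_cases hkk : k = k0
    · subst hkk
      rw [List.getD_eq_getElem _ 0 (by simp only [List.length_set]; omega),
          List.getD_eq_getElem _ 0 (by simp only [hcj]; omega)]
      rw [List.getElem_set_self (by simp only [List.length_set]; omega)]
      simp [hcj]
    · rw [List.getD_eq_getElem _ 0 (by simp only [List.length_set]; omega),
          List.getD_eq_getElem _ 0 (by simp only [hcj]; omega)]
      rw [List.getElem_set_ne (by omega)]
      simp [hkk, hcj]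
  · rw [List.getElem_set_ne (by omega)]
    simp [hjj]

theorem pv_dist_spec (nn : Nat) (hnn : 0 < nn) :
    ∀ (l : List Char) (s : Nat) (counts : List (List Int)),
    counts.length = nn → (∀ row ∈ counts, row.length = 26) →
    (PySem.List.enumerate l (s:Int)).foldl (pvAltStep (nn:Int)) counts
    = counts.mapIdx (fun j row => (List.range 26).map (fun k =>
        row.getD k 0 + ((PySem.List.enumerate l (s:Int)).countP
          (fun p => (PySem.Int.mod p.1 (nn:Int) == (j:Int)) && (p.2 == pvAlph.getD k 'A')) : Int))) := by
  intro l
  induction l with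
  | nil =>
    intro s counts hlen hrows
    simp only [PySem.List.enumerate, List.foldl_nil, List.countP_nil]
    apply List.ext_getElem (by simp)
    intro j hj1 hj2
    rw [List.getElem_mapIdx]
    simp only [Nat.cast_zero, add_zero]
    rw [pv_rowId _ (hrows _ (List.getElem_mem hj1))]
  | cons ch tl ih =>
    intro s counts hlen hrows
    rw [PySem.List.enumerate_cons, List.foldl_cons]
    have hcast : ((s:Int) + 1) = ((s+1 : Nat) : Int) := by push_cast; ring
    have hmodcast : PySem.Int.mod (s:Int) (nn:Int) = ((s % nn : Nat) : Int) := PySem.Int.mod_natCast s nn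
    have hj0 : s % nn < nn := Nat.mod_lt _ hnn
    by_cases hup : (0:Int) ≤ (ch.toNat : Int) - 65 ∧ (ch.toNat : Int) - 65 < 26
    · -- uppercase letter: exactly one cell is bumped
      have hk0 : ch.toNat - 65 < 26 := by omega
      have hk65 : ch.toNat = 65 + (ch.toNat - 65) := by omega
      have hj0len : s % nn < counts.length := by omega
      have hrowlen : (counts[s % nn]'hj0len).length = 26 :=
        hrows _ (List.getElem_mem hj0len)
      have hstep : pvAltStep (nn:Int) counts ((s:Int), ch)
          = counts.set (s % nn) ((counts[s % nn]'hj0len).set (ch.toNat - 65)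
              ((counts[s % nn]'hj0len)[ch.toNat - 65]'(by omega) + 1)) := by
        rw [pvAltStep]
        simp only [if_pos hup]
        have h1 : ((ch.toNat:Int) - 65) = ((ch.toNat - 65 : Nat) : Int) := by omega
        rw [hmodcast, h1, PySem.List.pySetD_natCast, PySem.List.pyGetD_natCast,
            PySem.List.pyGetD_natCast, PySem.List.pySetD_natCast,
            List.getD_eq_getElem counts [] hj0len,
            List.getD_eq_getElem _ 0 (by omega)]
      rw [hstep]
      have hrows' : ∀ row ∈ counts.set (s % nn) ((counts[s % nn]'hj0len).set (ch.toNat - 65)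
              ((counts[s % nn]'hj0len)[ch.toNat - 65]'(by omega) + 1)), row.length = 26 := by
        intro row hmem
        rcases List.mem_or_eq_of_mem_set hmem with h | h
        · exact hrows _ h
        · rw [h]; simp [hrowlen]
      rw [hcast, ih (s+1) _ (by simp [hlen]) hrows']
      apply List.ext_getElem (by simp)
      intro j hj1 hj2
      have hjnn : j < counts.length := by simpa using hj1
      rw [List.getElem_mapIdx, List.getElem_mapIdx]
      apply List.ext_getElem (by simp)
      intro k hk1 hk2
      have hk26 : k < 26 := by simpa using hk1
      simp only [List.getElem_map, List.getElem_range]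
      rw [List.countP_cons]
      rw [pv_head_pred nn s j k ch hk26]
      rw [pv_cell counts (counts[s % nn]'hj0len) (s % nn) (ch.toNat - 65) hj0len rfl hrowlen hk0 j k hjnn hk26 (by simpa using hj1)]
      have hiff : (j = s % nn ∧ ch.toNat = 65 + k) ↔ (j = s % nn ∧ k = ch.toNat - 65) := by
        constructor <;> (rintro ⟨a, b⟩; exact ⟨a, by omega⟩)
      by_cases hP : j = s % nn ∧ k = ch.toNat - 65
      · rw [if_pos hP, decide_eq_true (hiff.mpr hP)]
        push_cast
        simp
        ring
      · rw [if_neg hP, decide_eq_false (fun h => hP (hiff.mp h))]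
        push_cast
        ring
    · -- not an uppercase letter: counts unchanged, no histogram entry matches
      have hstep : pvAltStep (nn:Int) counts ((s:Int), ch) = counts := by
        rw [pvAltStep]; simp only [if_neg hup]
      rw [hstep, hcast, ih (s+1) counts hlen hrows]
      apply List.ext_getElem (by simp)
      intro j hj1 hj2
      rw [List.getElem_mapIdx, List.getElem_mapIdx]
      apply List.ext_getElem (by simp)
      intro k hk1 hk2
      have hk26 : k < 26 := by simpa using hk1
      simp only [List.getElem_map, List.getElem_range]
      rw [List.countP_cons]
      rw [pv_head_pred nn s j k ch hk26]
      rw [decide_eq_false (fun h => by omega : ¬ (j = s % nn ∧ ch.toNat = 65 + k))]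
      simp

theorem pv_filterMap_every {α : Type} (nn : Nat) (hnn : 0 < nn) :
    ∀ (count : Nat) (jn : Nat) (l : List α), l.length ≤ jn + nn * count →
    List.filterMap (fun k : Nat => l[((jn:Int) + (nn:Int) * (k:Int)).toNat]?) (List.range count)
    = pvEveryNth (l.drop jn) (nn-1) := by
  intro count
  induction count with
  | zero =>
    intro jn l hlen
    have : l.drop jn = [] := List.drop_eq_nil_of_le (by omega)
    simp [this, pvEveryNth]
  | succ c ih =>
    intro jn l hlen
    have hm : nn * (c+1) = nn * c + nn := by ring
    rw [List.range_succ_eq_map, List.filterMap_cons, List.filterMap_map]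
    by_cases hj : jn < l.length
    · have h0 : l[((jn:Int) + (nn:Int) * ((0:Nat):Int)).toNat]? = some (l[jn]'hj) := by
        have : ((jn:Int) + (nn:Int) * ((0:Nat):Int)).toNat = jn := by push_cast; omega
        rw [this, List.getElem?_eq_getElem hj]
      rw [h0]
      have hfc : List.filterMap ((fun k : Nat => l[((jn:Int) + (nn:Int) * (k:Int)).toNat]?) ∘ (fun k => k + 1)) (List.range c)
          = List.filterMap (fun k : Nat => l[(((jn+nn : Nat):Int) + (nn:Int) * (k:Int)).toNat]?) (List.range c) := by
        apply List.filterMap_congr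
        intro k _
        have : ((jn:Int) + (nn:Int) * (((k+1:Nat)):Int)).toNat = (((jn+nn : Nat):Int) + (nn:Int) * (k:Int)).toNat := by
          push_cast; ring_nf
        simp only [Function.comp]
        rw [this]
      rw [hfc, ih (jn + nn) l (by omega)]
      rw [List.drop_eq_getElem_cons hj, pvEveryNth]
      have hdd : (l.drop (jn+1)).drop (nn-1) = l.drop (jn + nn) := by
        rw [List.drop_drop]; congr 1; omega
      rw [hdd]
    · have hdrop : l.drop jn = [] := List.drop_eq_nil_of_le (by omega)
      rw [hdrop]
      have h0 : l[((jn:Int) + (nn:Int) * ((0:Nat):Int)).toNat]? = none := by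
        apply List.getElem?_eq_none
        push_cast; omega
      rw [h0]
      have : List.filterMap ((fun k : Nat => l[((jn:Int) + (nn:Int) * (k:Int)).toNat]?) ∘ (fun k => k + 1)) (List.range c) = [] := by
        rw [List.filterMap_eq_nil_iff]
        intro a _
        simp only [Function.comp]
        apply List.getElem?_eq_none
        have h2 : 0 ≤ (nn:Int) * ((a:Int) + 1) := by positivity
        push_cast at h2 ⊢; omega
      rw [this, pvEveryNth]

theorem pv_slice2every {α : Type} (l : List α) (jn nn : Nat) (hnn : 0 < nn) :
    PySem.List.slice? l (some (jn:Int)) none (nn:Int) = some (pvEveryNth (l.drop jn) (nn-1)) := by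
  have hnz : ((nn:Int) = 0) = False := by simp; omega
  have hneg : ((nn:Int) < 0) = False := by simp
  rw [PySem.List.slice?, PySem.List.sliceIndices]
  simp only [hnz, hneg, if_false, if_pos (by exact_mod_cast hnn : (0:Int) < (nn:Int))]
  have h0 : ¬ ((jn:Int) < 0) := by simp
  rw [if_neg h0]
  by_cases hlt : jn < l.length
  · have hmin : min (jn:Int) (l.length:Int) = (jn:Int) := by
      apply min_eq_left; exact_mod_cast le_of_lt hlt
    rw [hmin, if_pos (by exact_mod_cast hlt : (jn:Int) < (l.length:Int))]
    congr 1
    set num : Int := (l.length:Int) - jn + nn - 1 with hnum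
    have hq := Int.mul_ediv_add_emod num (nn:Int)
    have hr0 : 0 ≤ num % (nn:Int) := Int.emod_nonneg num (by simp; omega)
    have hr1 : num % (nn:Int) < nn := Int.emod_lt_of_pos num (by exact_mod_cast hnn)
    have hqn : 0 ≤ num / (nn:Int) := Int.ediv_nonneg (by omega) (by positivity)
    have hbound : (l.length : Int) ≤ (jn:Int) + (nn:Int) * (num / (nn:Int)) := by
      have : (nn:Int) * (num / (nn:Int)) = num - num % (nn:Int) := by omega
      omega
    apply pv_filterMap_every nn hnn
    have hcast : ((num / (nn:Int)).toNat : Int) = num / (nn:Int) := Int.toNat_of_nonneg hqn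
    have : (l.length : Int) ≤ (jn:Int) + (nn:Int) * ((num / (nn:Int)).toNat : Int) := by
      rw [hcast]; exact hbound
    exact_mod_cast this
  · have hmin : min (jn:Int) (l.length:Int) = (l.length:Int) := by
      apply min_eq_right; exact_mod_cast Nat.le_of_not_lt hlt
    rw [hmin, if_neg (by omega : ¬ ((l.length:Int) < (l.length:Int)))]
    have hdrop : l.drop jn = [] := List.drop_eq_nil_of_le (Nat.le_of_not_lt hlt)
    simp [hdrop, pvEveryNth]

theorem pv_everyCount (nn : Nat) (hnn : 0 < nn) (ch : Char) :
    ∀ (l : List Char) (jn : Nat), jn < nn →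
    (pvEveryNth (l.drop jn) (nn-1)).count ch = pvColCount nn l jn ch := by
  intro l
  induction l with
  | nil => intro jn hj; simp [pvEveryNth, pvColCount]
  | cons c t ih =>
    intro jn hj
    by_cases h0 : jn = 0
    · subst h0
      simp only [List.drop_zero, pvEveryNth, pvColCount]
      rw [List.count_cons]
      have := ih (nn-1) (by omega)
      simp only [this]
      by_cases hc : c = ch
      · simp [hc, Nat.add_comm]
      · simp [hc]
    · have hd : (c :: t).drop jn = t.drop (jn - 1) := by
        cases jn with
        | zero => omega
        | succ m => simp
      rw [hd]
      simp only [pvColCount, if_neg h0]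
      have := ih (jn-1) (by omega)
      simp [this, h0]

theorem pv_enumCount (nn : Nat) (hnn : 0 < nn) (ch : Char) (j : Nat) (hj : j < nn) :
    ∀ (l : List Char) (s : Nat),
    (PySem.List.enumerate l (s:Int)).countP
      (fun p => (PySem.Int.mod p.1 (nn:Int) == (j:Int)) && (p.2 == ch))
    = pvColCount nn l (if s % nn ≤ j then j - s % nn else j + nn - s % nn) ch := by
  intro l
  induction l with
  | nil => intro s; simp [PySem.List.enumerate, pvColCount]
  | cons c t ih =>
    intro s
    rw [PySem.List.enumerate_cons, List.countP_cons]
    have hq : s % nn < nn := Nat.mod_lt _ hnn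
    have hcast : ((s:Int) + 1) = ((s+1 : Nat) : Int) := by push_cast; ring
    rw [hcast, ih (s+1)]
    have hq' : (s+1) % nn = if s % nn + 1 = nn then 0 else s % nn + 1 := by
      have h1 : (s+1) % nn = (s % nn + 1) % nn := by
        conv_lhs => rw [← Nat.mod_add_div s nn]
        have : s % nn + nn * (s / nn) + 1 = s % nn + 1 + nn * (s / nn) := by ring
        rw [this]
        exact Nat.add_mul_mod_self_left _ _ _
      rw [h1]
      by_cases he : s % nn + 1 = nn
      · simp [he]
      · rw [if_neg he, Nat.mod_eq_of_lt (by omega)]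
    set r := (if s % nn ≤ j then j - s % nn else j + nn - s % nn) with hr
    have harg : (if (s+1) % nn ≤ j then j - (s+1) % nn else j + nn - (s+1) % nn)
        = (if r = 0 then nn - 1 else r - 1) := by
      rw [hq']; rw [hr]; split_ifs <;> omega
    rw [harg]
    show pvColCount nn t _ ch + _ = pvColCount nn (c :: t) r ch
    rw [pvColCount]
    have hif : (((PySem.Int.mod (s:Int) (nn:Int) == (j:Int)) && (c == ch)) = true)
        ↔ (r = 0 ∧ c = ch) := by
      rw [PySem.Int.mod_natCast]
      simp only [Bool.and_eq_true, beq_iff_eq, Nat.cast_inj]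
      have hr0 : r = 0 ↔ s % nn = j := by rw [hr]; split_ifs <;> omega
      constructor
      · rintro ⟨h1, h2⟩; exact ⟨hr0.mpr (by exact_mod_cast h1), h2⟩
      · rintro ⟨h1, h2⟩; refine ⟨?_, h2⟩; have := hr0.mp h1; exact_mod_cast this
    by_cases hh : r = 0 ∧ c = ch
    · rw [if_pos hh, if_pos (hif.mpr hh)]; omega
    · rw [if_neg hh]
      have : ¬ (((PySem.Int.mod (s:Int) (nn:Int) == (j:Int)) && (c == ch)) = true) := fun h => hh (hif.mp h)
      simp only [this]
      simp

theorem pv_fam_inv :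
    ∀ (t pre : List Int) (b v : Int), 0 ≤ b → ∀ (hb : b.toNat < pre.length),
    pre[b.toNat] = v → (∀ y ∈ pre, y ≤ v) → (∀ i (hi : i < b.toNat), pre[i]'(by omega) ≠ v) →
    0 ≤ (pvFam t (pre.length:Int) b v).1 ∧
    (∀ y ∈ pre ++ t, y ≤ (pvFam t (pre.length:Int) b v).2) ∧
    PySem.List.index? (pre ++ t) (pvFam t (pre.length:Int) b v).2
      = some (pvFam t (pre.length:Int) b v).1.toNat := by
  intro t
  induction t with
  | nil =>
    intro pre b v hb0 hb hbv hmax hfirst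
    refine ⟨hb0, by simpa using hmax, ?_⟩
    simp only [List.append_nil, pvFam]
    rw [PySem.List.index?_eq_some_iff]
    refine ⟨pre.take b.toNat, pre.drop (b.toNat + 1), ?_, ?_, ?_⟩
    · conv_lhs => rw [← List.take_append_drop b.toNat pre]
      rw [List.drop_eq_getElem_cons hb, hbv]
    · simp [Nat.min_eq_left (le_of_lt hb)]
    · intro hmem
      obtain ⟨i, hi, hiv⟩ := List.mem_iff_getElem.mp hmem
      have hilen2 : i < b.toNat ∧ i < pre.length := by simpa [Nat.lt_min] using hi
      have hilen : i < b.toNat := hilen2.1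
      exact hfirst i hilen (by rw [← hiv, List.getElem_take])
  | cons y t ih =>
    intro pre b v hb0 hb hbv hmax hfirst
    show 0 ≤ (pvFam (y :: t) (pre.length:Int) b v).1 ∧ _
    rw [pvFam]
    have hlen : ((pre.length : Int) + 1) = ((pre ++ [y]).length : Int) := by
      simp
    by_cases hyv : y > v
    · rw [if_pos hyv, hlen]
      have h := ih (pre ++ [y]) (pre.length : Int) y (by positivity)
        (by simp)
        (by simp)
        (by intro z hz
            rcases List.mem_append.mp hz with h1 | h1
            · exact le_of_lt (lt_of_le_of_lt (hmax z h1) hyv)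
            · simp at h1; omega)
        (by intro i hi
            have hi' : i < pre.length := by simpa using hi
            rw [List.getElem_append_left hi']
            exact fun hc => absurd hyv (by rw [← hc]; exact not_lt_of_ge (hmax _ (List.getElem_mem hi'))))
      rwa [List.append_cons pre y t]
    · rw [if_neg hyv, hlen]
      have h := ih (pre ++ [y]) b v hb0
        (by simp; omega)
        (by rw [List.getElem_append_left hb]; exact hbv)
        (by intro z hz
            rcases List.mem_append.mp hz with h1 | h1
            · exact hmax z h1
            · simp at h1; omega)
        (by intro i hi
            rw [List.getElem_append_left (by omega)]
            exact hfirst i hi)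
      rwa [List.append_cons pre y t]

theorem pv_enum2fam : ∀ (t : List Int) (s b v : Int),
    (PySem.List.enumerate t s).foldl (fun bb p => if p.2 > bb.2 then p else bb) (b, v)
    = pvFam t s b v := by
  intro t
  induction t with
  | nil => intro s b v; simp [PySem.List.enumerate, pvFam]
  | cons y t ih =>
    intro s b v
    rw [PySem.List.enumerate_cons]
    simp only [List.foldl_cons, pvFam]
    by_cases h : y > v
    · simp [h, ih]
    · simp [h, ih]

theorem pv_mapIdx_replicate {α β : Type} (f : Nat → α → β) :
    ∀ (n : Nat) (a : α), (List.replicate n a).mapIdx f = (List.range n).map (fun i => f i a) := by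
  intro n
  induction n generalizing f with
  | zero => intro a; simp
  | succ m ih =>
    intro a
    rw [List.replicate_succ, List.range_succ_eq_map, List.mapIdx_cons, List.map_cons, List.map_map]
    rw [ih]
    simp [Function.comp]


-- per-column agreement: the shift A appends for column jn equals the shift B computes
theorem pv_colshift (cl : List Char) (nn : Nat) (hnn : 0 < nn) (jn : Nat) (hj : jn < nn) :
    PySem.Int.mod
      (((PySem.List.index? pvAlph ((PySem.List.pyGet? pvAlph
          (pvLettreFreqMax ((PySem.List.slice? cl (some (jn:Int)) none (nn:Int)).getD []))).getD 'A')).getD 0 : Int)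
        - ((PySem.List.index? pvAlph 'E').getD 0 : Int)) 26
    = PySem.Int.mod (pvAltArgmax ((List.range 26).map (fun k =>
        (List.replicate 26 (0:Int)).getD k 0 + ((PySem.List.enumerate cl (0:Int)).countP
          (fun p => (PySem.Int.mod p.1 (nn:Int) == (jn:Int)) && (p.2 == pvAlph.getD k 'A')) : Int))) - 4) 26 := by
  have hslice : (PySem.List.slice? cl (some (jn:Int)) none (nn:Int)).getD []
      = pvEveryNth (cl.drop jn) (nn-1) := by
    rw [pv_slice2every cl jn nn hnn]; rfl
  rw [hslice]
  set col := pvEveryNth (cl.drop jn) (nn-1) with hcol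
  have halphmap : pvAlph = (List.range 26).map (fun k => pvAlph.getD k 'A') := by decide
  have hfreq : pvFreq col = (List.range 26).map (fun k => (col.count (pvAlph.getD k 'A') : Int)) := by
    rw [pvFreq, PySem.List.foldl_append_singleton_eq_map, List.nil_append]
    conv_lhs => rw [halphmap]
    rw [List.map_map]
    rfl
  have hcnt : ∀ k, k < 26 → (col.count (pvAlph.getD k 'A') : Int)
      = ((PySem.List.enumerate cl (0:Int)).countP
          (fun p => (PySem.Int.mod p.1 (nn:Int) == (jn:Int)) && (p.2 == pvAlph.getD k 'A')) : Int) := by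
    intro k hk
    rw [hcol, pv_everyCount nn hnn _ cl jn hj]
    have he := pv_enumCount nn hnn (pvAlph.getD k 'A') jn hj cl 0
    simp only [Nat.cast_zero, Nat.zero_mod, Nat.zero_le, if_pos, Nat.sub_zero] at he
    rw [he]
  have hrowEq : (List.range 26).map (fun k =>
        (List.replicate 26 (0:Int)).getD k 0 + ((PySem.List.enumerate cl (0:Int)).countP
          (fun p => (PySem.Int.mod p.1 (nn:Int) == (jn:Int)) && (p.2 == pvAlph.getD k 'A')) : Int))
      = pvFreq col := by
    rw [hfreq]
    apply List.map_congr_left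
    intro k hk
    rw [List.getD_replicate (0:Int) (by simpa using hk), zero_add, hcnt k (by simpa using hk)]
  rw [hrowEq]
  have hlen26 : (pvFreq col).length = 26 := by rw [hfreq]; simp
  obtain ⟨x, t, hxt⟩ : ∃ x t, pvFreq col = x :: t := by
    cases h : pvFreq col with
    | nil => rw [h] at hlen26; simp at hlen26
    | cons a b => exact ⟨a, b, rfl⟩
  have hinv := pv_fam_inv t [x] 0 x (le_refl 0) (by simp) (by simp)
    (by intro y hy; simp at hy; omega) (by intro i hi; simp at hi)
  simp only [List.length_cons, List.length_nil, List.singleton_append, Nat.cast_one,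
    zero_add] at hinv
  obtain ⟨h1, h2, h3⟩ := hinv
  obtain ⟨hK26, hKv, _⟩ := PySem.List.getElem_of_index?_eq_some h3
  have hK26' : (pvFam t 1 0 x).1.toNat < 26 := by
    have h26 : (x :: t).length = 26 := by rw [← hxt]; exact hlen26
    omega
  have hm_mem : t.foldl max x ∈ x :: t := by
    rcases PySem.List.foldl_max_mem t x with h | h
    · rw [h]; exact List.mem_cons_self
    · exact List.mem_cons_of_mem _ h
  have hr2_mem : (pvFam t 1 0 x).2 ∈ x :: t := hKv ▸ List.getElem_mem hK26
  have hmr : t.foldl max x = (pvFam t 1 0 x).2 := by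
    apply le_antisymm (h2 _ hm_mem)
    rcases List.mem_cons.mp hr2_mem with h | h
    · rw [h]; exact (PySem.List.le_foldl_max t x).1
    · exact (PySem.List.le_foldl_max t x).2 _ h
  -- A's letter index
  have hlfm : pvLettreFreqMax col = (((pvFam t 1 0 x).1.toNat : Nat) : Int) := by
    have hmaxeq : PySem.List.max? (pvFreq col) (fun y => y) = some ((pvFam t 1 0 x).2) := by
      rw [hxt, PySem.List.max?_id_cons, hmr]
    rw [pvLettreFreqMax, hmaxeq, Option.getD_some, hxt, h3]
    rfl
  have hround : ∀ K, K < 26 → (PySem.List.index? pvAlph (pvAlph.getD K 'A')).getD 0 = K := by decide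
  have hE : (PySem.List.index? pvAlph 'E').getD 0 = 4 := by decide
  have hget : (PySem.List.pyGet? pvAlph ((((pvFam t 1 0 x).1.toNat : Nat) : Int))).getD 'A'
      = pvAlph.getD (pvFam t 1 0 x).1.toNat 'A' := by
    rw [PySem.List.pyGet?_natCast, List.getElem?_eq_getElem (by simpa [pvAlph] using hK26')]
    rw [List.getD_eq_getElem _ 'A' (by simpa [pvAlph] using hK26')]
    simp
  rw [hlfm, hget, hround _ hK26', hE]
  -- B's argmax
  have hbb : pvAltArgmax (pvFreq col) = (pvFam t 1 0 x).1 := by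
    rw [pvAltArgmax, hxt, PySem.List.pyGetD_zero_cons, PySem.List.enumerate_cons,
        List.foldl_cons]
    simp only [lt_irrefl, if_false, gt_iff_lt]
    rw [show (0:Int) + 1 = 1 by ring]
    rw [pv_enum2fam t 1 0 x]
  rw [hbb]
  rw [Int.toNat_of_nonneg h1]
  norm_num

-- ===== VERDICT (by name: the statement is the Claim_ definition above) =====
theorem clef_par_decalages_spec : Claim_equal_clef_par_decalages := by
  intro cipher key_length _
  show clef_par_decalages cipher key_length = clef_par_decalages_alt cipher key_length
  by_cases hk : key_length ≤ 0
  · rw [clef_par_decalages, clef_par_decalages_alt, if_pos hk,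
        PySem.List.pyRange_one_eq_nil hk, List.foldl_nil]
  · have hpos : 0 < key_length := by omega
    set nn := key_length.toNat with hnn
    have hnn0 : 0 < nn := by omega
    have hkl : key_length = (nn:Int) := by omega
    rw [clef_par_decalages, clef_par_decalages_alt, if_neg hk, hkl]
    rw [show ((nn:Int)).toNat = nn by simp]
    have hrepl : ∀ row ∈ List.replicate nn (List.replicate (26:Nat) (0:Int)), row.length = 26 := by
      intro row h; rw [List.eq_of_mem_replicate h]; simp
    have hd := pv_dist_spec nn hnn0 cipher.toList 0 (List.replicate nn (List.replicate 26 0))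
      (by simp) hrepl
    simp only [Nat.cast_zero] at hd
    simp only [PySem.List.foldl_append_singleton_eq_map, List.nil_append, List.map_id']
    rw [hd, pv_mapIdx_replicate]
    rw [PySem.List.pyRange_one 0 (nn:Int)]
    rw [show ((nn:Int) - 0).toNat = nn by simp]
    rw [List.map_map, List.map_map]
    apply List.map_congr_left
    intro jn hjn
    have hjlt : jn < nn := List.mem_range.mp hjn
    simp only [Function.comp, zero_add]
    exact pv_colshift cipher.toList nn hnn0 jn hjlt
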